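-- pv_equiv track=rewrite | github.com/PPchayutt/PSCP | Week-10/Cat Parade.py | process_cats
-- ===== SOURCE A (Python) =====
-- def process_cats(input_lines):
--     """process cat"""
--     cats = {}
--     all_cats = []
--     for line in input_lines:
--         if line == "IT'S A DOG":
--             if all_cats:
--                 last_cat = all_cats.pop()
--                 if cats[last_cat][1] == 1:
--                     del cats[last_cat]
--                 else:
--                     cats[last_cat][1] -= 1
--         else:
--             breeds = line.split(", ")
--             for breed in breeds:
--                 all_cats.append(breed)
--                 if breed not in cats:
--                     cats[breed] = [len(all_cats), 1]
--                 else: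
--                     cats[breed][1] += 1
--     return cats
-- ===== SOURCE B (Python) =====
-- def _build_cats(stack):
--     """Rebuild the breed table from the surviving stack in one pass."""
--     cats = {}
--     for i, breed in enumerate(stack):
--         if breed in cats:
--             cats[breed][1] += 1
--         else:
--             cats[breed] = [i + 1, 1]
--     return cats
--
--
-- def process_cats(input_lines):
--     """process cat"""
--     stack = []
--     for line in input_lines:
--         if line == "IT'S A DOG":
--             if stack:
--                 stack.pop()
--         else:
--             stack.extend(line.split(", "))
--     return _build_cats(stack)
-- ===== Notes on version B (the rewrite author's own statement) =====
-- stated objective: simpler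
-- what changed: A interleaves dict bookkeeping (insert/position/decrement/delete) with every push and pop; B first simulates only the stack across all lines and then rebuilds the {breed: [first-index, count]} dict in one pass over the surviving stack, relying on the LIFO property that a survivor's stored position equals its first occurrence index in the final stack.
import Mathlib
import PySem

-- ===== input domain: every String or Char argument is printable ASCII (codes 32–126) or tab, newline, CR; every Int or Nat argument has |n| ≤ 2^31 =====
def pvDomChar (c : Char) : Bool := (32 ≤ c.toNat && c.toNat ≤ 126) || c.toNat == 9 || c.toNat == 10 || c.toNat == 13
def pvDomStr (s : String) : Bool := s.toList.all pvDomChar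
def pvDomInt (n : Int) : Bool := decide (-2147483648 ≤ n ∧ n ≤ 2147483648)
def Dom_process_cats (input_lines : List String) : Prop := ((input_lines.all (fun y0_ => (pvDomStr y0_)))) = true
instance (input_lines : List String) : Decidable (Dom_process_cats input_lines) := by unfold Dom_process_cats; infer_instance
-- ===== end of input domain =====

-- B replaces A's interleaved dict bookkeeping (insert/decrement/delete on every line) by two passes:
-- simulate only the stack, then rebuild the dict once from the surviving stack (objective: simpler).

-- ===== PORT A =====
-- One iteration of A's `for line in input_lines` loop; state = (cats, all_cats).
-- `cats[last_cat]` / `[...][1]` are ported with getD defaults: exact here, because the popped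
-- breed is always a key of cats and its value always a 2-element list (established by the proof).
-- the body of A's inner `for breed in breeds` loop
def pvPushA (st : PySem.Dict String (List Int) × List String) (breed : String) :
    PySem.Dict String (List Int) × List String :=
  let all' := st.2 ++ [breed]
  if !(st.1.contains breed) then
    (st.1.insert breed [(all'.length : Int), 1], all')
  else
    (st.1.modify breed [] (fun w => w.set 1 (PySem.List.pyGetD w 1 0 + 1)), all')

def pvStepA (st : PySem.Dict String (List Int) × List String) (line : String) :
    PySem.Dict String (List Int) × List String :=
  if line == "IT'S A DOG" then
    match PySem.List.pop? st.2 (-1) with        -- `if all_cats: last_cat = all_cats.pop()`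
    | none => st
    | some (last_cat, rest) =>
        if PySem.List.pyGetD (st.1.getD last_cat []) 1 0 == 1 then
          (st.1.erase last_cat, rest)
        else
          (st.1.modify last_cat [] (fun w => w.set 1 (PySem.List.pyGetD w 1 0 - 1)), rest)
  else
    -- sep ", " is a nonempty literal, so split? is never none
    ((PySem.Str.split? line ", ").getD []).foldl pvPushA st

def process_cats (input_lines : List String) : List (String × List Int) :=
  (input_lines.foldl pvStepA (PySem.Dict.empty, [])).1.items

-- ===== PORT B =====
-- pass 2 of B (_build_cats): one pass over the final stack
def pvBuildStep (d : PySem.Dict String (List Int)) (p : Int × String) :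
    PySem.Dict String (List Int) :=
  if d.contains p.2 then
    d.modify p.2 [] (fun w => w.set 1 (PySem.List.pyGetD w 1 0 + 1))
  else
    d.insert p.2 [p.1 + 1, 1]

def pvBuildCats (stack : List String) : PySem.Dict String (List Int) :=
  (PySem.List.enumerate stack 0).foldl pvBuildStep PySem.Dict.empty

-- pass 1 of B: the stack alone
def pvStackStep (stack : List String) (line : String) : List String :=
  if line == "IT'S A DOG" then
    (if stack.isEmpty then stack else stack.dropLast)   -- `if stack: stack.pop()`
  else
    stack ++ (PySem.Str.split? line ", ").getD []

def process_cats_alt (input_lines : List String) : List (String × List Int) :=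
  (pvBuildCats (input_lines.foldl pvStackStep [])).items

-- ===== PRECONDITION & SPEC =====
def Spec_process_cats (input_lines : List String) (out : List (String × List Int)) : Prop := out = process_cats_alt input_lines
instance (input_lines : List String) (out : List (String × List Int)) : Decidable (Spec_process_cats input_lines out) := by unfold Spec_process_cats; infer_instance

-- ===== CLAIM (what is proved, stated in full; the proofs are below) =====
def Claim_equal_process_cats : Prop := ∀ (input_lines : List String), Dom_process_cats input_lines → Spec_process_cats input_lines (process_cats input_lines)

-- ===== LEMMAS AND PROOFS =====

-- both branches of pvBuildStep are an insert at key p.2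
theorem pvBuildStep_eq_insert (d : PySem.Dict String (List Int)) (p : Int × String) :
    pvBuildStep d p = d.insert p.2
      (if d.contains p.2 then (d.getD p.2 []).set 1 (PySem.List.pyGetD (d.getD p.2 []) 1 0 + 1)
       else [p.1 + 1, 1]) := by
  unfold pvBuildStep
  split_ifs <;> rfl

theorem pvBuildCats_append_singleton (t : List String) (b : String) :
    pvBuildCats (t ++ [b]) = pvBuildStep (pvBuildCats t) ((t.length : Int), b) := by
  unfold pvBuildCats
  rw [PySem.List.enumerate_append]
  simp [PySem.List.enumerate]

theorem contains_pvBuildCats (t : List String) (b : String) :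
    (pvBuildCats t).contains b = decide (b ∈ t) := by
  induction t using List.reverseRecOn with
  | nil => simp [pvBuildCats, PySem.List.enumerate]
  | append_singleton t x ih =>
      rw [pvBuildCats_append_singleton, pvBuildStep_eq_insert,
          PySem.Dict.contains_insert, ih]
      by_cases hbx : b = x <;> simp [hbx]

theorem nodup_keys_pvBuildCats (t : List String) : (pvBuildCats t).keys.Nodup := by
  induction t using List.reverseRecOn with
  | nil => exact PySem.Dict.nodup_keys_empty
  | append_singleton t x ih =>
      rw [pvBuildCats_append_singleton, pvBuildStep_eq_insert]
      exact PySem.Dict.nodup_keys_insert _ _ _ ih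

theorem getD_pvBuildCats (t : List String) (b : String) (hb : b ∈ t) :
    ∃ p : Int, (pvBuildCats t).getD b [] = [p, (t.count b : Int)] := by
  induction t using List.reverseRecOn with
  | nil => simp at hb
  | append_singleton t x ih =>
      rw [pvBuildCats_append_singleton, pvBuildStep_eq_insert]
      by_cases hbx : b = x
      · subst hbx
        by_cases hm : b ∈ t
        · obtain ⟨p, hp⟩ := ih hm
          refine ⟨p, ?_⟩
          rw [PySem.Dict.getD_insert_self]
          rw [contains_pvBuildCats]
          simp [hm, hp, PySem.List.pyGetD, List.count_append]
        · refine ⟨(t.length : Int) + 1, ?_⟩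
          rw [PySem.Dict.getD_insert_self]
          rw [contains_pvBuildCats]
          simp [hm, List.count_append, List.count_eq_zero_of_not_mem hm]
      · have hbt : b ∈ t := by
          rcases List.mem_append.mp hb with h | h
          · exact h
          · simp at h; exact absurd h hbx
        obtain ⟨p, hp⟩ := ih hbt
        refine ⟨p, ?_⟩
        rw [PySem.Dict.getD_insert_of_ne _ _ _ hbx, hp]
        have hx : List.count b [x] = 0 := List.count_eq_zero_of_not_mem (by simp [hbx])
        simp [List.count_append, hx]

-- re-inserting the value a key already holds changes nothing (keys unique)
theorem insert_self_of_get? (d : PySem.Dict String (List Int)) (k : String) (v : List Int)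
    (hnd : d.keys.Nodup) (h : d.get? k = some v) : d.insert k v = d := by
  have hc : d.contains k = true := by
    rw [PySem.Dict.contains_eq_isSome_get?, h]; rfl
  apply PySem.Dict.ext
  simp only [PySem.Dict.insert, hc, if_pos]
  have hcong : ∀ p ∈ d.items,
      (fun p : String × List Int => if (p.1 == k) = true then (k, v) else p) p = id p := by
    intro p hp
    by_cases hk : p.1 = k
    · have h2 : d.get? k = some p.2 := by
        apply PySem.Dict.get?_of_mem_items _ _ hnd
        rw [← hk]; exact hp
      rw [h] at h2
      injection h2 with h2
      cases p with
      | mk a w =>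
          simp only at hk h2
          subst hk; subst h2
          simp
    · simp [hk]
  rw [List.map_congr_left hcong, List.map_id]

theorem erase_insert_of_not_contains (d : PySem.Dict String (List Int)) (k : String)
    (v : List Int) (hc : d.contains k = false) : (d.insert k v).erase k = d := by
  apply PySem.Dict.ext
  simp only [PySem.Dict.insert, hc, Bool.false_eq_true, if_false, PySem.Dict.erase]
  have h2 : ∀ p ∈ d.items, (p.1 == k) = false := by
    simpa [PySem.Dict.contains, List.any_eq_false] using hc
  have hall : ∀ p ∈ d.items, (!(p.1 == k)) = true := by
    intro p hp; simp [h2 p hp]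
  rw [List.filter_append, List.filter_eq_self.mpr hall]
  simp

-- the "IT'S A DOG" body of A undoes the last push, at the dict level
theorem pop_pvBuildCats (t : List String) (b : String) :
    (if PySem.List.pyGetD ((pvBuildCats (t ++ [b])).getD b []) 1 0 == 1 then
        (pvBuildCats (t ++ [b])).erase b
      else
        (pvBuildCats (t ++ [b])).modify b [] (fun w => w.set 1 (PySem.List.pyGetD w 1 0 - 1)))
      = pvBuildCats t := by
  rw [pvBuildCats_append_singleton, pvBuildStep_eq_insert]
  by_cases hm : b ∈ t
  · obtain ⟨p, hp⟩ := getD_pvBuildCats t b hm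
    have hcnt : 1 ≤ t.count b := List.count_pos_iff.mpr hm
    rw [contains_pvBuildCats]
    simp only [hm, decide_true, if_true, hp]
    have hset : (([p, (t.count b : Int)].set 1
        (PySem.List.pyGetD [p, (t.count b : Int)] 1 0 + 1)) : List Int)
        = [p, (t.count b : Int) + 1] := rfl
    rw [hset, PySem.Dict.getD_insert_self]
    have hg : PySem.List.pyGetD [p, (t.count b : Int) + 1] 1 0 = (t.count b : Int) + 1 := rfl
    rw [hg]
    have hfalse : (((t.count b : Int) + 1) == 1) = false := by
      simp only [beq_eq_false_iff_ne, ne_eq]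
      omega
    rw [hfalse]
    simp only [Bool.false_eq_true, if_false]
    simp only [PySem.Dict.modify, PySem.Dict.getD_insert_self]
    have hdec : (([p, (t.count b : Int) + 1].set 1
        (PySem.List.pyGetD [p, (t.count b : Int) + 1] 1 0 - 1)) : List Int)
        = [p, (t.count b : Int)] := by
      rw [hg]
      simp
    rw [hdec, PySem.Dict.insert_insert_self, ← hp]
    apply insert_self_of_get? _ _ _ (nodup_keys_pvBuildCats t)
    have hc : (pvBuildCats t).contains b = true := by
      rw [contains_pvBuildCats]; simpa
    rw [PySem.Dict.contains_eq_isSome_get?] at hc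
    cases hg2 : (pvBuildCats t).get? b with
    | none => rw [hg2] at hc; simp at hc
    | some w => rw [PySem.Dict.getD_eq_get?_getD, hg2]; rfl
  · rw [contains_pvBuildCats]
    simp only [hm, decide_false, Bool.false_eq_true, if_false]
    rw [PySem.Dict.getD_insert_self]
    have h1 : (PySem.List.pyGetD [(t.length : Int) + 1, 1] 1 0 == 1) = true := rfl
    rw [h1]
    simp only [if_true]
    exact erase_insert_of_not_contains _ _ _ (by rw [contains_pvBuildCats]; simpa)

-- one pushed breed keeps the invariant
theorem push_step (s : List String) (b : String) :
    pvPushA (pvBuildCats s, s) b = (pvBuildCats (s ++ [b]), s ++ [b]) := by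
  rw [pvBuildCats_append_singleton]
  unfold pvPushA pvBuildStep
  by_cases hc : (pvBuildCats s).contains b = true
  · simp [hc, PySem.Dict.modify]
  · simp only [Bool.not_eq_true] at hc
    simp [hc]

theorem push_fold (bs : List String) : ∀ s : List String,
    bs.foldl pvPushA (pvBuildCats s, s) = (pvBuildCats (s ++ bs), s ++ bs) := by
  induction bs with
  | nil => intro s; simp
  | cons b bs ih =>
      intro s
      rw [List.foldl_cons, push_step, ih (s ++ [b])]
      simp

-- one line of A keeps the invariant
theorem line_step (line : String) (s : List String) :
    pvStepA (pvBuildCats s, s) line = (pvBuildCats (pvStackStep s line), pvStackStep s line) := by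
  unfold pvStepA pvStackStep
  by_cases hd : (line == "IT'S A DOG") = true
  · simp only [hd, if_true]
    induction s using List.reverseRecOn with
    | nil => rfl
    | append_singleton t b _ =>
        rw [PySem.List.pop?_last]
        have hne : (t ++ [b]).isEmpty = false := by simp
        simp only [hne, Bool.false_eq_true, if_false, List.dropLast_concat]
        have hpop := pop_pvBuildCats t b
        by_cases h1 : (PySem.List.pyGetD ((pvBuildCats (t ++ [b])).getD b []) 1 0 == 1) = true
        · rw [if_pos h1] at hpop
          rw [if_pos h1, hpop]
        · rw [if_neg h1] at hpop
          rw [if_neg h1, hpop]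
  · simp only [hd, Bool.false_eq_true, if_false]
    exact push_fold _ s

theorem main_fold (lines : List String) : ∀ s : List String,
    lines.foldl pvStepA (pvBuildCats s, s)
      = (pvBuildCats (lines.foldl pvStackStep s), lines.foldl pvStackStep s) := by
  induction lines with
  | nil => intro s; rfl
  | cons l ls ih =>
      intro s
      rw [List.foldl_cons, line_step, List.foldl_cons]
      exact ih (pvStackStep s l)

-- ===== VERDICT (by name: the statement is the Claim_ definition above) =====
theorem process_cats_spec : Claim_equal_process_cats := by
  intro input_lines _
  unfold Spec_process_cats process_cats process_cats_alt
  have h0 : pvBuildCats [] = PySem.Dict.empty := rfl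
  rw [← h0, main_fold]
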